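-- pv_equiv track=rewrite | github.com/NateOs/whisperthing | src/analysis.py | _extract_context
-- ===== SOURCE A (Python) =====
-- def _extract_context(text: str, start_pos: int, end_pos: int, context_words: int = 5) -> str:
--     """Extract context around a keyword match."""
--     words = text.split()
--
--     # Find word positions
--     char_count = 0
--     start_word_idx = 0
--     end_word_idx = len(words)
--
--     for i, word in enumerate(words):
--         if char_count <= start_pos < char_count + len(word):
--             start_word_idx = i
--         if char_count <= end_pos <= char_count + len(word):
--             end_word_idx = i + 1
--             break
--         char_count += len(word) + 1  # +1 for space
--
--     # Extract context
--     context_start = max(0, start_word_idx - context_words)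
--     context_end = min(len(words), end_word_idx + context_words)
--
--     context_words_list = words[context_start:context_end]
--     return ' '.join(context_words_list)
-- ===== SOURCE B (Python) =====
-- def _extract_context(text: str, start_pos: int, end_pos: int, context_words: int = 5) -> str:
--     """Extract context around a keyword match."""
--     words = text.split()
--
--     # Build the offset table: starting char offset of each word in the
--     # single-space model (offset_{i+1} = offset_i + len(word_i) + 1).
--     offsets = []
--     c = 0
--     for w in words:
--         offsets.append(c)
--         c += len(w) + 1
--
--     # End word: first (= only) word whose closed range [o, o+len] holds end_pos.
--     end_word_idx = len(words)
--     for i, (o, w) in enumerate(zip(offsets, words)):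
--         if o <= end_pos <= o + len(w):
--             end_word_idx = i + 1
--             break
--
--     # Start word: first (= only) word, at or before the end word, whose
--     # half-open range [o, o+len) holds start_pos.
--     start_word_idx = 0
--     for i, (o, w) in enumerate(zip(offsets[:end_word_idx], words[:end_word_idx])):
--         if o <= start_pos < o + len(w):
--             start_word_idx = i
--             break
--
--     context_start = max(0, start_word_idx - context_words)
--     context_end = min(len(words), end_word_idx + context_words)
--     return ' '.join(words[context_start:context_end])
-- ===== Notes on version B (the rewrite author's own statement) =====
-- stated objective: alternative
-- what changed: B separates tokenization from search: it first builds an explicit table of each word's starting char offset (single-space model), then finds the end word and the start word by two independent first-match lookups over that table (the start lookup restricted to words up to the end word), instead of A's single interleaved scan with a running char counter and a break.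
import Mathlib
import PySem

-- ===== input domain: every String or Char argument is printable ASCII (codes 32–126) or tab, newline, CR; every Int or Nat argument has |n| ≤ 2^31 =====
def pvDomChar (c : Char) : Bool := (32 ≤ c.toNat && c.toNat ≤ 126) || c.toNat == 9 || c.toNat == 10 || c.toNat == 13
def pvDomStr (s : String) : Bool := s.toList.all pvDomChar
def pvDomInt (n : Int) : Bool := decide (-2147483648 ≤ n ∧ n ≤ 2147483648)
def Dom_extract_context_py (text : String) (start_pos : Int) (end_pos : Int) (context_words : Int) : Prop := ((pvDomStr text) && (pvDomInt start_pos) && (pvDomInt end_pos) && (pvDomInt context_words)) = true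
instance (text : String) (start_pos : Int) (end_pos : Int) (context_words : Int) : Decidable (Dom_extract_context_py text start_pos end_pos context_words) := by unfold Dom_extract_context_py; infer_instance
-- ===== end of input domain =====

-- B replaces A's single interleaved scan (running char counter + break) by an explicit
-- word-offset table built first, then two independent first-match searches over it;
-- same return value, objective: alternative decomposition (not faster).

-- ===== PORT A =====
-- the enumerate loop of A: state (i, char_count, start_word_idx, end_word_idx), break on the end match
def aScan : List String → Int → Int → Int → Int → Int → Int → Int × Int
  | [], _, _, _, _, s, e => (s, e)
  | w :: ws, sp, ep, i, cc, s, e =>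
    let s' := if cc ≤ sp ∧ sp < cc + PySem.Str.len w then i else s
    if cc ≤ ep ∧ ep ≤ cc + PySem.Str.len w then (s', i + 1)
    else aScan ws sp ep (i + 1) (cc + PySem.Str.len w + 1) s' e

def extract_context_py (text : String) (start_pos : Int) (end_pos : Int) (context_words : Int) : String :=
  let words := PySem.Str.split₀ text
  let r := aScan words start_pos end_pos 0 0 0 (words.length : Int)
  let context_start := max 0 (r.1 - context_words)
  let context_end := min (words.length : Int) (r.2 + context_words)
  PySem.Str.join " " (PySem.List.slice words (some context_start) (some context_end))

-- ===== PORT B =====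
-- offset table: starting char offset of each word in the single-space model
def buildOffsets : List String → Int → List Int
  | [], _ => []
  | w :: ws, c => c :: buildOffsets ws (c + PySem.Str.len w + 1)

-- first word whose closed range [o, o+len] holds end_pos
def findEnd : List (Int × String) → Int → Option Nat
  | [], _ => none
  | (o, w) :: ps, ep =>
    if o ≤ ep ∧ ep ≤ o + PySem.Str.len w then some 0 else (findEnd ps ep).map (· + 1)

-- first word whose half-open range [o, o+len) holds start_pos
def findStart : List (Int × String) → Int → Option Nat
  | [], _ => none
  | (o, w) :: ps, sp =>
    if o ≤ sp ∧ sp < o + PySem.Str.len w then some 0 else (findStart ps sp).map (· + 1)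

def extract_context_py_alt (text : String) (start_pos : Int) (end_pos : Int) (context_words : Int) : String :=
  let words := PySem.Str.split₀ text
  let offsets := buildOffsets words 0
  let end_word_idx : Int :=
    match findEnd (offsets.zip words) end_pos with
    | some i => (i : Int) + 1
    | none => (words.length : Int)
  let start_word_idx : Int :=
    match findStart ((PySem.List.slice offsets none (some end_word_idx)).zip
                       (PySem.List.slice words none (some end_word_idx))) start_pos with
    | some i => (i : Int)
    | none => 0
  let context_start := max 0 (start_word_idx - context_words)
  let context_end := min (words.length : Int) (end_word_idx + context_words)
  PySem.Str.join " " (PySem.List.slice words (some context_start) (some context_end))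

-- ===== PRECONDITION & SPEC =====
def Spec_extract_context_py (text : String) (start_pos : Int) (end_pos : Int) (context_words : Int) (out : String) : Prop := out = extract_context_py_alt text start_pos end_pos context_words
instance (text : String) (start_pos : Int) (end_pos : Int) (context_words : Int) (out : String) : Decidable (Spec_extract_context_py text start_pos end_pos context_words out) := by unfold Spec_extract_context_py; infer_instance

-- ===== CLAIM (what is proved, stated in full; the proofs are below) =====
def Claim_equal_extract_context_py : Prop := ∀ (text : String) (start_pos : Int) (end_pos : Int) (context_words : Int), Dom_extract_context_py text start_pos end_pos context_words → Spec_extract_context_py text start_pos end_pos context_words (extract_context_py text start_pos end_pos context_words)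

-- ===== LEMMAS AND PROOFS =====

theorem strLen_nonneg (w : String) : 0 ≤ PySem.Str.len w := by
  simp [PySem.Str.len_eq]

theorem length_buildOffsets (ws : List String) (c : Int) :
    (buildOffsets ws c).length = ws.length := by
  induction ws generalizing c with
  | nil => simp [buildOffsets]
  | cons w ws ih => simp [buildOffsets, ih]

theorem findStart_none_of_lt (ws : List String) (cc sp : Int) (h : sp < cc) :
    findStart ((buildOffsets ws cc).zip ws) sp = none := by
  induction ws generalizing cc with
  | nil => simp [buildOffsets, findStart]
  | cons w ws ih =>
    have hw := strLen_nonneg w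
    have h1 : ¬ (cc ≤ sp ∧ sp < cc + PySem.Str.len w) := by omega
    simp only [buildOffsets, List.zip_cons_cons, findStart, if_neg h1]
    rw [ih (cc + PySem.Str.len w + 1) (by omega)]
    rfl

theorem findStart_take_none (ps : List (Int × String)) (sp : Int) (n : Nat)
    (h : findStart ps sp = none) : findStart (ps.take n) sp = none := by
  induction ps generalizing n with
  | nil => simpa using h
  | cons p ps ih =>
    obtain ⟨o, w⟩ := p
    cases n with
    | zero => rfl
    | succ n =>
      simp only [List.take_succ_cons, findStart] at h ⊢
      by_cases hc : o ≤ sp ∧ sp < o + PySem.Str.len w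
      · rw [if_pos hc] at h ⊢
        exact h
      · rw [if_neg hc] at h ⊢
        have h' : findStart ps sp = none := by
          rcases hh : findStart ps sp with _ | k
          · rfl
          · rw [hh] at h; simp at h
        rw [ih n h']
        rfl

-- the heart: A's interleaved scan equals B's two searches over the offset table
theorem scan_eq (ws : List String) (sp ep : Int) (i cc s e0 : Int) :
    aScan ws sp ep i cc s e0 =
      (match findEnd ((buildOffsets ws cc).zip ws) ep with
       | some k =>
         ((match findStart (((buildOffsets ws cc).zip ws).take (k + 1)) sp with
           | some j => i + (j : Int)
           | none => s), i + (k : Int) + 1)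
       | none =>
         ((match findStart ((buildOffsets ws cc).zip ws) sp with
           | some j => i + (j : Int)
           | none => s), e0)) := by
  induction ws generalizing i cc s with
  | nil => simp [aScan, buildOffsets, findEnd, findStart]
  | cons w ws ih =>
    have hw := strLen_nonneg w
    simp only [aScan, buildOffsets, List.zip_cons_cons, findEnd, findStart]
    by_cases hE : cc ≤ ep ∧ ep ≤ cc + PySem.Str.len w
    · -- break at the head word
      rw [if_pos hE, if_pos hE]
      simp only [List.take_succ_cons, List.take_zero, findStart, Option.map_none]
      by_cases hS : cc ≤ sp ∧ sp < cc + PySem.Str.len w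
      · rw [if_pos hS, if_pos hS]
        simp
      · rw [if_neg hS, if_neg hS]
        simp
    · rw [if_neg hE, if_neg hE]
      rw [ih]
      by_cases hS : cc ≤ sp ∧ sp < cc + PySem.Str.len w
      · -- start matched at the head; later offsets are all > sp
        have hnone : findStart ((buildOffsets ws (cc + PySem.Str.len w + 1)).zip ws) sp = none :=
          findStart_none_of_lt ws _ sp (by omega)
        rcases hK : findEnd ((buildOffsets ws (cc + PySem.Str.len w + 1)).zip ws) ep with _ | k
        · simp only [hK, Option.map_none, if_pos hS, hnone]
          simp
        · simp only [hK, Option.map_some, if_pos hS,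
            findStart_take_none _ _ _ hnone, List.take_succ_cons, findStart, if_pos hS]
          simp only [Prod.mk.injEq]
          push_cast
          omega
      · rcases hK : findEnd ((buildOffsets ws (cc + PySem.Str.len w + 1)).zip ws) ep with _ | k
        · simp only [hK, Option.map_none, if_neg hS]
          rcases hJ : findStart ((buildOffsets ws (cc + PySem.Str.len w + 1)).zip ws) sp with _ | j
          · simp [hJ]
          · simp only [hJ, Option.map_some]
            simp only [Prod.mk.injEq]
            push_cast
            constructor <;> first | trivial | omega
        · simp only [hK, Option.map_some, if_neg hS, List.take_succ_cons, findStart, if_neg hS]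
          rcases hJ : findStart (((buildOffsets ws (cc + PySem.Str.len w + 1)).zip ws).take (k + 1)) sp with _ | j
          · simp only [hJ, Option.map_none]
            simp only [Prod.mk.injEq]
            push_cast
            constructor <;> first | trivial | omega
          · simp only [hJ, Option.map_some]
            simp only [Prod.mk.injEq]
            push_cast
            constructor <;> first | trivial | omega

-- ===== VERDICT (by name: the statement is the Claim_ definition above) =====
theorem extract_context_py_spec : Claim_equal_extract_context_py := by
  intro text sp ep cw _
  unfold Spec_extract_context_py extract_context_py extract_context_py_alt
  dsimp only
  rw [scan_eq]
  rcases hK : findEnd (((buildOffsets (PySem.Str.split₀ text) 0)).zip (PySem.Str.split₀ text)) ep with _ | k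
  · simp only [hK]
    rw [PySem.List.slice_to_natCast, PySem.List.slice_to_natCast]
    rw [List.take_of_length_le (by rw [length_buildOffsets]), List.take_length]
    rcases hJ : findStart ((buildOffsets (PySem.Str.split₀ text) 0).zip (PySem.Str.split₀ text)) sp with _ | j
    · simp [hJ]
    · simp [hJ]
  · simp only [hK]
    have h1 : PySem.List.slice (buildOffsets (PySem.Str.split₀ text) 0) none (some ((k : Int) + 1)) = (buildOffsets (PySem.Str.split₀ text) 0).take (k + 1) := by
      rw [PySem.List.slice_to _ (by omega)]
      have hkn : ((k : Int) + 1).toNat = k + 1 := by omega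
      rw [hkn]
    have h2 : PySem.List.slice (PySem.Str.split₀ text) none (some ((k : Int) + 1)) = (PySem.Str.split₀ text).take (k + 1) := by
      rw [PySem.List.slice_to _ (by omega)]
      have hkn : ((k : Int) + 1).toNat = k + 1 := by omega
      rw [hkn]
    rw [h1, h2]
    have h3 : ((buildOffsets (PySem.Str.split₀ text) 0).take (k + 1)).zip ((PySem.Str.split₀ text).take (k + 1)) = (((buildOffsets (PySem.Str.split₀ text) 0)).zip (PySem.Str.split₀ text)).take (k + 1) := by
      simp [List.zip_eq_zipWith, List.take_zipWith]
    rw [h3]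
    rcases hJ : findStart ((((buildOffsets (PySem.Str.split₀ text) 0)).zip (PySem.Str.split₀ text)).take (k + 1)) sp with _ | j
    · simp [hJ]
    · simp [hJ]
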